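-- pv_equiv track=rewrite | github.com/xueli-lxl/python | Main09.py | func
-- ===== SOURCE A (Python) =====
-- def func(graph,s):#graph图  s指的是开始结点
--     path =[]
--     for x1 in graph[s]:
--         if x1 > s:
--             try:
--                 nodes2 = graph[x1]
--             except KeyError as e:
--                 pass
--             else:
--                 for x2 in nodes2:
--                     if x2 > s:
--                         try:
--                             nodes3 = graph[x2]
--                         except KeyError as e:
--                             pass
--                         else:
--                             for x3 in nodes3:
--                                 if s == x3:
--                                     A = [s,x1,x2]
--                                     if len(set(A)) == len(A):
--                                         path.append(A)
--                                 elif x3 > s: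
--                                     try:
--                                         nodes4 = graph[x3]
--                                     except KeyError as e:
--                                         pass
--                                     else:
--                                         for x4 in nodes4:
--                                             if s == x4:
--                                                 A = [s,x1,x2,x3]
--                                                 if len(set(A)) == len(A):
--                                                     path.append(A)
--                                             elif x4 > s:
--                                                 try:
--                                                     nodes5 = graph[x4]
--                                                 except KeyError as e:
--                                                     pass
--                                                 else:
--                                                     for x5 in nodes5:
--                                                         if s == x5:
--                                                             A = [s,x1,x2,x3,x4]
--                                                             if len(set(A)) == len(A):
--                                                                 path.append(A)
--                                                         elif x5 > s:
--                                                             try: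
--                                                                 nodes6 = graph[x5]
--                                                             except KeyError as e:
--                                                                 pass
--                                                             else:
--                                                                 for x6 in nodes6:
--                                                                     if s == x6:
--                                                                         A = [s,x1,x2,x3,x4,x5]
--                                                                         if len(set(A)) == len(A):
--                                                                             path.append(A)
--                                                                     elif x6 > s:
--                                                                         try:
--                                                                             nodes7 = graph[x6]
--                                                                         except KeyError as e:
--                                                                             pass
--                                                                         else:
--                                                                             for x7 in nodes7:
--                                                                                 if s == x7:
--                                                                                     A = [s,x1,x2,x3,x4,x5,x6]
--                                                                                     if len(set(A)) == len(A):
--                                                                                         path.append(A)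
--                                                                                     else:
--                                                                                         break
--     return path
-- ===== SOURCE B (Python) =====
-- def func(graph, s):
--     result = []
--     def dfs(path, neighbors):
--         for nxt in neighbors:
--             if len(path) >= 3 and nxt == s:
--                 if len(set(path)) == len(path):
--                     result.append(list(path))
--             elif nxt > s and len(path) <= 6:
--                 try:
--                     ns = graph[nxt]
--                 except KeyError:
--                     continue
--                 dfs(path + [nxt], ns)
--     dfs([s], graph[s])
--     return result
-- ===== Notes on version B (the rewrite author's own statement) =====
-- stated objective: simpler
-- what changed: Replaced A's six hand-copied nested for-loops (one per cycle length) with a single short recursive DFS over (path, neighbors) that closes a cycle when len(path)>=3 and the neighbor equals s, and recurses while len(path)<=6; same values, neighbor order and multiplicity.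
-- outside the precondition, e.g. on func({1: [2]}, 0): A raises KeyError, B raises KeyError
import Mathlib
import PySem

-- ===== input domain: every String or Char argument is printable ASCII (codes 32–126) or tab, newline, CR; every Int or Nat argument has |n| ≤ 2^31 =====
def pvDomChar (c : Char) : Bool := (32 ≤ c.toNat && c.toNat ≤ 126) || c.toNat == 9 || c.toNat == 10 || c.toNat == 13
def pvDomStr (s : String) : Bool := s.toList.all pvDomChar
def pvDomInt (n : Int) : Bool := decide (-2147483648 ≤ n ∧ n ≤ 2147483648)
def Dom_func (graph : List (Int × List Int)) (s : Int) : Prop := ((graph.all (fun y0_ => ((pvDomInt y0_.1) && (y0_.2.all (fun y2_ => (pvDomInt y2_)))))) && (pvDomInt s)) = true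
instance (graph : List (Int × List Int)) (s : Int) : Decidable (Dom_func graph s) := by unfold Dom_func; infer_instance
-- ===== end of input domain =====

-- B replaces A's six hand-copied nested loops by one short recursive DFS over the same
-- depth window (cycle lengths 3..7); same return value, including neighbor order and
-- multiplicity. Objective: simpler.

-- shared Python primitives: dict lookup (first match) and len(set(l)) == len(l)
def pyLookup (graph : List (Int × List Int)) (k : Int) : Option (List Int) :=
  (PySem.Dict.mk graph).get? k

def pyNodup (l : List Int) : Bool := (PySem.Set.ofList l).length == l.length

-- ===== PORT A =====
-- A's innermost 'for x7 in nodes7' loop, with its break, as recursion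
def loopA7 (s : Int) (A : List Int) (path : List (List Int)) : List Int → List (List Int)
  | [] => path
  | x7 :: ns =>
    if s = x7 then
      if pyNodup A then loopA7 s A (path ++ [A]) ns else path
    else loopA7 s A path ns

-- A's 'for x6 in nodes6' loop
def loopA6 (graph : List (Int × List Int)) (s x1 x2 x3 x4 x5 : Int)
    (path : List (List Int)) (ns : List Int) : List (List Int) :=
  ns.foldl (fun path x6 =>
    if s = x6 then
      if pyNodup [s, x1, x2, x3, x4, x5] then path ++ [[s, x1, x2, x3, x4, x5]] else path
    else if x6 > s then
      match pyLookup graph x6 with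
      | none => path
      | some ns7 => loopA7 s [s, x1, x2, x3, x4, x5, x6] path ns7
    else path) path

-- A's 'for x5 in nodes5' loop
def loopA5 (graph : List (Int × List Int)) (s x1 x2 x3 x4 : Int)
    (path : List (List Int)) (ns : List Int) : List (List Int) :=
  ns.foldl (fun path x5 =>
    if s = x5 then
      if pyNodup [s, x1, x2, x3, x4] then path ++ [[s, x1, x2, x3, x4]] else path
    else if x5 > s then
      match pyLookup graph x5 with
      | none => path
      | some ns6 => loopA6 graph s x1 x2 x3 x4 x5 path ns6
    else path) path

-- A's 'for x4 in nodes4' loop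
def loopA4 (graph : List (Int × List Int)) (s x1 x2 x3 : Int)
    (path : List (List Int)) (ns : List Int) : List (List Int) :=
  ns.foldl (fun path x4 =>
    if s = x4 then
      if pyNodup [s, x1, x2, x3] then path ++ [[s, x1, x2, x3]] else path
    else if x4 > s then
      match pyLookup graph x4 with
      | none => path
      | some ns5 => loopA5 graph s x1 x2 x3 x4 path ns5
    else path) path

-- A's 'for x3 in nodes3' loop
def loopA3 (graph : List (Int × List Int)) (s x1 x2 : Int)
    (path : List (List Int)) (ns : List Int) : List (List Int) :=
  ns.foldl (fun path x3 =>
    if s = x3 then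
      if pyNodup [s, x1, x2] then path ++ [[s, x1, x2]] else path
    else if x3 > s then
      match pyLookup graph x3 with
      | none => path
      | some ns4 => loopA4 graph s x1 x2 x3 path ns4
    else path) path

-- A's 'for x2 in nodes2' loop
def loopA2 (graph : List (Int × List Int)) (s x1 : Int)
    (path : List (List Int)) (ns : List Int) : List (List Int) :=
  ns.foldl (fun path x2 =>
    if x2 > s then
      match pyLookup graph x2 with
      | none => path
      | some ns3 => loopA3 graph s x1 x2 path ns3
    else path) path

def func (graph : List (Int × List Int)) (s : Int) : List (List Int) :=
  match pyLookup graph s with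
  | none => []          -- Python raises KeyError here; excluded by Pre_func
  | some ns1 =>
    ns1.foldl (fun path x1 =>
      if x1 > s then
        match pyLookup graph x1 with
        | none => path
        | some ns2 => loopA2 graph s x1 path ns2
      else path) []

-- ===== PORT B =====
-- one recursive dfs over (path, remaining neighbors), accumulating results
def dfs (graph : List (Int × List Int)) (s : Int) (path : List Int)
    (acc : List (List Int)) : List Int → List (List Int)
  | [] => acc
  | nxt :: rest =>
    if 3 ≤ path.length ∧ nxt = s then
      dfs graph s path (if pyNodup path then acc ++ [path] else acc) rest
    else if _h : nxt > s ∧ path.length ≤ 6 then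
      match pyLookup graph nxt with
      | none => dfs graph s path acc rest
      | some ns => dfs graph s path (dfs graph s (path ++ [nxt]) acc ns) rest
    else dfs graph s path acc rest
termination_by ns => (7 - path.length, ns.length)
decreasing_by
  · exact Prod.Lex.right _ (Nat.lt_succ_self _)
  · exact Prod.Lex.right _ (Nat.lt_succ_self _)
  · apply Prod.Lex.left
    simp only [List.length_append, List.length_cons, List.length_nil]
    omega
  · exact Prod.Lex.right _ (Nat.lt_succ_self _)
  · exact Prod.Lex.right _ (Nat.lt_succ_self _)

def func_alt (graph : List (Int × List Int)) (s : Int) : List (List Int) :=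
  match pyLookup graph s with
  | none => []          -- Python raises KeyError here; excluded by Pre_func
  | some ns1 => dfs graph s [s] [] ns1

-- ===== PRECONDITION & SPEC =====
-- Pre_ excludes exactly the inputs where s is not a key of graph: there both A and B
-- raise KeyError on the unguarded graph[s].
def Pre_func (graph : List (Int × List Int)) (s : Int) : Prop :=
  (pyLookup graph s).isSome = true
instance (graph : List (Int × List Int)) (s : Int) : Decidable (Pre_func graph s) := by
  unfold Pre_func; infer_instance

def pvWitness_func : (List (Int × List Int)) × Int := ([(0, [1, 2]), (1, [2]), (2, [0])], 0)

def Spec_func (graph : List (Int × List Int)) (s : Int) (out : List (List Int)) : Prop := out = func_alt graph s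
instance (graph : List (Int × List Int)) (s : Int) (out : List (List Int)) : Decidable (Spec_func graph s out) := by unfold Spec_func; infer_instance

-- ===== CLAIM (what is proved, stated in full; the proofs are below) =====
def Claim_equal_func : Prop := ∀ (graph : List (Int × List Int)) (s : Int), Dom_func graph s → Pre_func graph s → Spec_func graph s (func graph s)

-- ===== LEMMAS AND PROOFS =====

theorem dfs_nil (graph : List (Int × List Int)) (s : Int) (path : List Int)
    (acc : List (List Int)) : dfs graph s path acc [] = acc := by
  rw [dfs]

theorem dfs_cons (graph : List (Int × List Int)) (s : Int) (path : List Int)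
    (acc : List (List Int)) (nxt : Int) (rest : List Int) :
    dfs graph s path acc (nxt :: rest) =
    if 3 ≤ path.length ∧ nxt = s then
      dfs graph s path (if pyNodup path then acc ++ [path] else acc) rest
    else if nxt > s ∧ path.length ≤ 6 then
      match pyLookup graph nxt with
      | none => dfs graph s path acc rest
      | some ns => dfs graph s path (dfs graph s (path ++ [nxt]) acc ns) rest
    else dfs graph s path acc rest := by
  rw [dfs]
  split_ifs <;> rfl

-- a length-7 path with a repeated node contributes nothing
theorem dfs7_dup (graph : List (Int × List Int)) (s : Int) (A : List Int)
    (hA : A.length = 7) (hd : pyNodup A = false) :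
    ∀ (ns : List Int) (acc : List (List Int)), dfs graph s A acc ns = acc := by
  intro ns
  induction ns with
  | nil => intro acc; exact dfs_nil ..
  | cons x rest ih =>
    intro acc
    rw [dfs_cons, hA]
    simp only [hd, Bool.false_eq_true, if_false]
    have h6 : ¬ (x > s ∧ (7 : Nat) ≤ 6) := by omega
    split_ifs <;> simp [ih]

theorem dfs_eq_loopA7 (graph : List (Int × List Int)) (s : Int) (A : List Int)
    (hA : A.length = 7) :
    ∀ (ns : List Int) (acc : List (List Int)),
      dfs graph s A acc ns = loopA7 s A acc ns := by
  intro ns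
  induction ns with
  | nil => intro acc; rw [dfs_nil, loopA7]
  | cons x rest ih =>
    intro acc
    rw [dfs_cons, loopA7, hA]
    by_cases hx : x = s
    · rw [if_pos ⟨by norm_num, hx⟩, if_pos hx.symm]
      cases hd : pyNodup A with
      | true => exact ih _
      | false =>
        simp only [Bool.false_eq_true, if_false]
        exact dfs7_dup graph s A hA hd rest acc
    · have h1 : ¬ ((3:Nat) ≤ 7 ∧ x = s) := by simp [hx]
      have h6 : ¬ (x > s ∧ (7:Nat) ≤ 6) := by omega
      rw [if_neg h1, if_neg h6, if_neg (fun h => hx h.symm)]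
      exact ih acc

theorem dfs_eq_loopA6 (graph : List (Int × List Int)) (s x1 x2 x3 x4 x5 : Int) :
    ∀ (ns : List Int) (acc : List (List Int)),
      dfs graph s [s, x1, x2, x3, x4, x5] acc ns = loopA6 graph s x1 x2 x3 x4 x5 acc ns := by
  intro ns
  induction ns with
  | nil => intro acc; rw [dfs_nil]; rfl
  | cons x rest ih =>
    intro acc
    rw [dfs_cons]
    simp only [loopA6, List.foldl_cons]
    by_cases hx : x = s
    · have h1 : 3 ≤ ([s, x1, x2, x3, x4, x5] : List Int).length ∧ x = s := ⟨by simp, hx⟩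
      rw [if_pos h1, if_pos hx.symm]
      exact ih _
    · have h1 : ¬ (3 ≤ ([s, x1, x2, x3, x4, x5] : List Int).length ∧ x = s) := fun h => hx h.2
      by_cases hgt : x > s
      · have h2 : x > s ∧ ([s, x1, x2, x3, x4, x5] : List Int).length ≤ 6 := ⟨hgt, by simp⟩
        rw [if_neg h1, if_pos h2, if_neg (fun h => hx h.symm), if_pos hgt]
        cases hl : pyLookup graph x with
        | none => exact ih acc
        | some ns' =>
          dsimp only
          have hext : ([s, x1, x2, x3, x4, x5] : List Int) ++ [x] = [s, x1, x2, x3, x4, x5, x] := by simp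
          rw [hext, dfs_eq_loopA7 graph s [s, x1, x2, x3, x4, x5, x] (by simp) ns' acc]
          exact ih _
      · have h2 : ¬ (x > s ∧ ([s, x1, x2, x3, x4, x5] : List Int).length ≤ 6) := fun h => hgt h.1
        rw [if_neg h1, if_neg h2, if_neg (fun h => hx h.symm), if_neg hgt]
        exact ih acc

theorem dfs_eq_loopA5 (graph : List (Int × List Int)) (s x1 x2 x3 x4 : Int) :
    ∀ (ns : List Int) (acc : List (List Int)),
      dfs graph s [s, x1, x2, x3, x4] acc ns = loopA5 graph s x1 x2 x3 x4 acc ns := by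
  intro ns
  induction ns with
  | nil => intro acc; rw [dfs_nil]; rfl
  | cons x rest ih =>
    intro acc
    rw [dfs_cons]
    simp only [loopA5, List.foldl_cons]
    by_cases hx : x = s
    · have h1 : 3 ≤ ([s, x1, x2, x3, x4] : List Int).length ∧ x = s := ⟨by simp, hx⟩
      rw [if_pos h1, if_pos hx.symm]
      exact ih _
    · have h1 : ¬ (3 ≤ ([s, x1, x2, x3, x4] : List Int).length ∧ x = s) := fun h => hx h.2
      by_cases hgt : x > s
      · have h2 : x > s ∧ ([s, x1, x2, x3, x4] : List Int).length ≤ 6 := ⟨hgt, by simp⟩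
        rw [if_neg h1, if_pos h2, if_neg (fun h => hx h.symm), if_pos hgt]
        cases hl : pyLookup graph x with
        | none => exact ih acc
        | some ns' =>
          dsimp only
          have hext : ([s, x1, x2, x3, x4] : List Int) ++ [x] = [s, x1, x2, x3, x4, x] := by simp
          rw [hext, dfs_eq_loopA6 graph s x1 x2 x3 x4 x ns' acc]
          exact ih _
      · have h2 : ¬ (x > s ∧ ([s, x1, x2, x3, x4] : List Int).length ≤ 6) := fun h => hgt h.1
        rw [if_neg h1, if_neg h2, if_neg (fun h => hx h.symm), if_neg hgt]
        exact ih acc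

theorem dfs_eq_loopA4 (graph : List (Int × List Int)) (s x1 x2 x3 : Int) :
    ∀ (ns : List Int) (acc : List (List Int)),
      dfs graph s [s, x1, x2, x3] acc ns = loopA4 graph s x1 x2 x3 acc ns := by
  intro ns
  induction ns with
  | nil => intro acc; rw [dfs_nil]; rfl
  | cons x rest ih =>
    intro acc
    rw [dfs_cons]
    simp only [loopA4, List.foldl_cons]
    by_cases hx : x = s
    · have h1 : 3 ≤ ([s, x1, x2, x3] : List Int).length ∧ x = s := ⟨by simp, hx⟩
      rw [if_pos h1, if_pos hx.symm]
      exact ih _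
    · have h1 : ¬ (3 ≤ ([s, x1, x2, x3] : List Int).length ∧ x = s) := fun h => hx h.2
      by_cases hgt : x > s
      · have h2 : x > s ∧ ([s, x1, x2, x3] : List Int).length ≤ 6 := ⟨hgt, by simp⟩
        rw [if_neg h1, if_pos h2, if_neg (fun h => hx h.symm), if_pos hgt]
        cases hl : pyLookup graph x with
        | none => exact ih acc
        | some ns' =>
          dsimp only
          have hext : ([s, x1, x2, x3] : List Int) ++ [x] = [s, x1, x2, x3, x] := by simp
          rw [hext, dfs_eq_loopA5 graph s x1 x2 x3 x ns' acc]
          exact ih _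
      · have h2 : ¬ (x > s ∧ ([s, x1, x2, x3] : List Int).length ≤ 6) := fun h => hgt h.1
        rw [if_neg h1, if_neg h2, if_neg (fun h => hx h.symm), if_neg hgt]
        exact ih acc

theorem dfs_eq_loopA3 (graph : List (Int × List Int)) (s x1 x2 : Int) :
    ∀ (ns : List Int) (acc : List (List Int)),
      dfs graph s [s, x1, x2] acc ns = loopA3 graph s x1 x2 acc ns := by
  intro ns
  induction ns with
  | nil => intro acc; rw [dfs_nil]; rfl
  | cons x rest ih =>
    intro acc
    rw [dfs_cons]
    simp only [loopA3, List.foldl_cons]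
    by_cases hx : x = s
    · have h1 : 3 ≤ ([s, x1, x2] : List Int).length ∧ x = s := ⟨by simp, hx⟩
      rw [if_pos h1, if_pos hx.symm]
      exact ih _
    · have h1 : ¬ (3 ≤ ([s, x1, x2] : List Int).length ∧ x = s) := fun h => hx h.2
      by_cases hgt : x > s
      · have h2 : x > s ∧ ([s, x1, x2] : List Int).length ≤ 6 := ⟨hgt, by simp⟩
        rw [if_neg h1, if_pos h2, if_neg (fun h => hx h.symm), if_pos hgt]
        cases hl : pyLookup graph x with
        | none => exact ih acc
        | some ns' =>
          dsimp only
          have hext : ([s, x1, x2] : List Int) ++ [x] = [s, x1, x2, x] := by simp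
          rw [hext, dfs_eq_loopA4 graph s x1 x2 x ns' acc]
          exact ih _
      · have h2 : ¬ (x > s ∧ ([s, x1, x2] : List Int).length ≤ 6) := fun h => hgt h.1
        rw [if_neg h1, if_neg h2, if_neg (fun h => hx h.symm), if_neg hgt]
        exact ih acc

theorem dfs_eq_loopA2 (graph : List (Int × List Int)) (s x1 : Int) :
    ∀ (ns : List Int) (acc : List (List Int)),
      dfs graph s [s, x1] acc ns = loopA2 graph s x1 acc ns := by
  intro ns
  induction ns with
  | nil => intro acc; rw [dfs_nil]; rfl
  | cons x rest ih =>
    intro acc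
    rw [dfs_cons]
    simp only [loopA2, List.foldl_cons]
    have h1 : ¬ (3 ≤ ([s, x1] : List Int).length ∧ x = s) := by simp
    by_cases hgt : x > s
    · have h2 : x > s ∧ ([s, x1] : List Int).length ≤ 6 := ⟨hgt, by simp⟩
      rw [if_neg h1, if_pos h2, if_pos hgt]
      cases hl : pyLookup graph x with
      | none => exact ih acc
      | some ns' =>
        dsimp only
        have hext : ([s, x1] : List Int) ++ [x] = [s, x1, x] := by simp
        rw [hext, dfs_eq_loopA3 graph s x1 x ns' acc]
        exact ih _
    · have h2 : ¬ (x > s ∧ ([s, x1] : List Int).length ≤ 6) := fun h => hgt h.1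
      rw [if_neg h1, if_neg h2, if_neg hgt]
      exact ih acc

theorem dfs_eq_top (graph : List (Int × List Int)) (s : Int) :
    ∀ (ns : List Int) (acc : List (List Int)),
      dfs graph s [s] acc ns =
      ns.foldl (fun path x1 =>
        if x1 > s then
          match pyLookup graph x1 with
          | none => path
          | some ns2 => loopA2 graph s x1 path ns2
        else path) acc := by
  intro ns
  induction ns with
  | nil => intro acc; rw [dfs_nil]; rfl
  | cons x rest ih =>
    intro acc
    rw [dfs_cons]
    simp only [List.foldl_cons]
    have h1 : ¬ (3 ≤ ([s] : List Int).length ∧ x = s) := by simp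
    by_cases hgt : x > s
    · have h2 : x > s ∧ ([s] : List Int).length ≤ 6 := ⟨hgt, by simp⟩
      rw [if_neg h1, if_pos h2, if_pos hgt]
      cases hl : pyLookup graph x with
      | none => exact ih acc
      | some ns' =>
        dsimp only
        have hext : ([s] : List Int) ++ [x] = [s, x] := by simp
        rw [hext, dfs_eq_loopA2 graph s x ns' acc]
        exact ih _
    · have h2 : ¬ (x > s ∧ ([s] : List Int).length ≤ 6) := fun h => hgt h.1
      rw [if_neg h1, if_neg h2, if_neg hgt]
      exact ih acc


-- ===== VERDICT (by name: the statement is the Claim_ definition above) =====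
theorem func_spec : Claim_equal_func := by
  intro graph s _ _
  unfold Spec_func func func_alt
  cases h : pyLookup graph s with
  | none => rfl
  | some ns1 => exact (dfs_eq_top graph s ns1 []).symm
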